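-- pv_equiv track=rewrite | github.com/dayvr/python-practice | dictionary.py | ancestors
-- ===== SOURCE A (Python) =====
-- def ancestors(genealogy, person):
--     if person in genealogy:
--         parents = genealogy[person]
--         result = parents
--         for parent in parents:
--             result = result + ancestors(genealogy, parent)
--         return result
--     return []
-- ===== SOURCE B (Python) =====
-- def ancestors(genealogy, person):
--     # Memoized depth-first traversal: each person's ancestor list is computed
--     # once, cached, and reused wherever that person recurs in the tree.
--     memo = {}
--
--     def visit(p):
--         cached = memo.get(p)
--         if cached is not None:
--             return cached
--         if p not in genealogy:
--             return []
--         result = list(genealogy[p])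
--         for q in genealogy[p]:
--             result += visit(q)
--         memo[p] = result
--         return result
--
--     return visit(person)
-- ===== Notes on version B (the rewrite author's own statement) =====
-- stated objective: alternative
-- what changed: B replaces A's plain recursive recomputation with a memoized depth-first traversal: each person's ancestor list is cached in a dict and reused wherever that person recurs, instead of being recomputed for every path.
import Mathlib
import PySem

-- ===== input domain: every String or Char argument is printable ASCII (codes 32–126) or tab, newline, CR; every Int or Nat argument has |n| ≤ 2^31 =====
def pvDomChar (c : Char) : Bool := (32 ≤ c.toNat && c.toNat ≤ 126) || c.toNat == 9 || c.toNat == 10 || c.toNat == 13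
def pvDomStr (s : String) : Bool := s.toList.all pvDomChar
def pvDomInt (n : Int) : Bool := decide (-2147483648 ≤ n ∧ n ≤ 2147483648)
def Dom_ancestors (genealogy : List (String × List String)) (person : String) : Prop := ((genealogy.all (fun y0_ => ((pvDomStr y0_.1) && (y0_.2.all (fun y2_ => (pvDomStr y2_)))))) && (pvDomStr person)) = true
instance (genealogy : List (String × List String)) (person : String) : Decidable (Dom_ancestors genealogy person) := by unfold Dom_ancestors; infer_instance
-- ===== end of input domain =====

-- B memoizes each person's ancestor list in a dict and reuses it wherever that person recurs, instead of recomputing it for every path as A does.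

-- ===== PORT A =====
-- A's recursion is ported with a fuel counter: on any input satisfying Pre_
-- (the recursion from `person` terminates) the genealogy depth from `person`
-- is ≤ genealogy.length + 1, so the fuel never runs out there; fuel 0
-- corresponds to Python's RecursionError, which Pre_ excludes.
def ancestorsFuel (g : List (String × List String)) : Nat → String → List String
  | 0, _ => []
  | n+1, person =>
    match (PySem.Dict.mk g).get? person with
    | some parents => parents.foldl (fun result parent => result ++ ancestorsFuel g n parent) parents
    | none => []

def ancestors (genealogy : List (String × List String)) (person : String) : List String :=
  ancestorsFuel genealogy (genealogy.length + 1) person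

-- ===== PORT B =====
-- visit(p) from Source B: the memo dict is threaded through explicitly; same fuel
-- convention as port A (memoized recursion depth is bounded the same way).
def visitB (g : List (String × List String)) : Nat → PySem.Dict String (List String) → String → List String × PySem.Dict String (List String)
  | 0, memo, _ => ([], memo)
  | n+1, memo, p =>
    match memo.get? p with
    | some cached => (cached, memo)
    | none =>
      match (PySem.Dict.mk g).get? p with
      | none => ([], memo)
      | some parents =>
        let st := parents.foldl
          (fun (st : List String × PySem.Dict String (List String)) q =>
            let r := visitB g n st.2 q
            (st.1 ++ r.1, r.2)) (parents, memo)
        (st.1, st.2.insert p st.1)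

def ancestors_alt (genealogy : List (String × List String)) (person : String) : List String :=
  (visitB genealogy (genealogy.length + 1) PySem.Dict.empty person).1

-- ===== PRECONDITION & SPEC =====
-- Graph depth of the genealogy seen from p (none = a cycle is reachable):
-- omax combines child depths, depthF g n p is the length of the longest
-- parent-chain of dictionary keys starting at p, computed with fuel n.
def omax : Option Nat → Option Nat → Option Nat
  | some d, some m => some (max d m)
  | _, _ => none

def depthF (g : List (String × List String)) : Nat → String → Option Nat
  | 0, p =>
    match (PySem.Dict.mk g).get? p with
    | none => some 0
    | some _ => none
  | n+1, p =>
    match (PySem.Dict.mk g).get? p with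
    | none => some 0
    | some ps => (ps.foldr (fun q acc => omax (depthF g n q) acc) (some 0)).map (· + 1)

-- Pre_ excludes exactly the inputs on which a parent-cycle is reachable from
-- `person`, where Python A (and B alike) raises RecursionError; on every input
-- where A returns a value the chain of distinct keys from `person` has depth
-- ≤ genealogy.length + 1, so depthF succeeds and the input is admitted.
def Pre_ancestors (genealogy : List (String × List String)) (person : String) : Prop :=
  (depthF genealogy (genealogy.length + 1) person).isSome = true
instance (genealogy : List (String × List String)) (person : String) : Decidable (Pre_ancestors genealogy person) := by unfold Pre_ancestors; infer_instance

def pvWitness_ancestors : (List (String × List String)) × String :=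
  ([("a", ["b", "c"]), ("b", ["c"]), ("c", [])], "a")

def Spec_ancestors (genealogy : List (String × List String)) (person : String) (out : List String) : Prop := out = ancestors_alt genealogy person
instance (genealogy : List (String × List String)) (person : String) (out : List String) : Decidable (Spec_ancestors genealogy person out) := by unfold Spec_ancestors; infer_instance

-- ===== CLAIM (what is proved, stated in full; the proofs are below) =====
def Claim_equal_ancestors : Prop := ∀ (genealogy : List (String × List String)) (person : String), Dom_ancestors genealogy person → Pre_ancestors genealogy person → Spec_ancestors genealogy person (ancestors genealogy person)

-- ===== LEMMAS AND PROOFS =====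

lemma fold_omax_mem {f : String → Option Nat} {ps : List String} {m : Nat}
    (h : ps.foldr (fun q acc => omax (f q) acc) (some 0) = some m) :
    ∀ q ∈ ps, ∃ d, f q = some d ∧ d ≤ m := by
  induction ps generalizing m with
  | nil => intro q hq; cases hq
  | cons q qs ih =>
    intro r hr
    rw [List.foldr_cons] at h
    cases hfq : f q with
    | none =>
      rw [hfq] at h
      cases hrest : qs.foldr (fun q acc => omax (f q) acc) (some 0) with
      | none => rw [hrest] at h; simp [omax] at h
      | some m' => rw [hrest] at h; simp [omax] at h
    | some d =>
      rw [hfq] at h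
      cases hrest : qs.foldr (fun q acc => omax (f q) acc) (some 0) with
      | none => rw [hrest] at h; simp [omax] at h
      | some m' =>
        rw [hrest] at h
        simp only [omax] at h
        injection h with h; subst h
        rcases List.mem_cons.mp hr with rfl | hr2
        · exact ⟨d, hfq, Nat.le_max_left _ _⟩
        · obtain ⟨d', hd', hle⟩ := ih hrest r hr2
          exact ⟨d', hd', le_trans hle (Nat.le_max_right _ _)⟩

lemma fold_omax_bound {f : String → Option Nat} {ps : List String} {m n : Nat}
    (hb : ∀ q ∈ ps, ∀ d, f q = some d → d ≤ n)
    (h : ps.foldr (fun q acc => omax (f q) acc) (some 0) = some m) : m ≤ n := by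
  induction ps generalizing m with
  | nil => simp at h; omega
  | cons q qs ih =>
    rw [List.foldr_cons] at h
    cases hfq : f q with
    | none =>
      rw [hfq] at h
      cases hrest : qs.foldr (fun q acc => omax (f q) acc) (some 0) with
      | none => rw [hrest] at h; simp [omax] at h
      | some m' => rw [hrest] at h; simp [omax] at h
    | some d =>
      rw [hfq] at h
      cases hrest : qs.foldr (fun q acc => omax (f q) acc) (some 0) with
      | none => rw [hrest] at h; simp [omax] at h
      | some m' =>
        rw [hrest] at h
        simp only [omax] at h
        injection h with h; subst h
        have h1 := hb q List.mem_cons_self d hfq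
        have h2 := ih (fun r hr => hb r (List.mem_cons_of_mem _ hr)) hrest
        omega

lemma fold_omax_congr {f f' : String → Option Nat} {ps : List String} {m : Nat}
    (hc : ∀ q ∈ ps, ∀ d, f q = some d → f' q = some d)
    (h : ps.foldr (fun q acc => omax (f q) acc) (some 0) = some m) :
    ps.foldr (fun q acc => omax (f' q) acc) (some 0) = some m := by
  induction ps generalizing m with
  | nil => exact h
  | cons q qs ih =>
    rw [List.foldr_cons] at h
    rw [List.foldr_cons]
    cases hfq : f q with
    | none =>
      rw [hfq] at h
      cases hrest : qs.foldr (fun q acc => omax (f q) acc) (some 0) with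
      | none => rw [hrest] at h; simp [omax] at h
      | some m' => rw [hrest] at h; simp [omax] at h
    | some d =>
      rw [hfq] at h
      cases hrest : qs.foldr (fun q acc => omax (f q) acc) (some 0) with
      | none => rw [hrest] at h; simp [omax] at h
      | some m' =>
        rw [hrest] at h
        rw [hc q List.mem_cons_self d hfq,
          ih (fun r hr => hc r (List.mem_cons_of_mem _ hr)) hrest]
        exact h

lemma depthF_mono (g : List (String × List String)) :
    ∀ n p d, depthF g n p = some d → depthF g (n+1) p = some d := by
  intro n
  induction n with
  | zero =>
    intro p d h
    cases hget : (PySem.Dict.mk g).get? p with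
    | none => simp [depthF, hget] at h ⊢; omega
    | some ps => simp [depthF, hget] at h
  | succ n ih =>
    intro p d h
    cases hget : (PySem.Dict.mk g).get? p with
    | none => simp [depthF, hget] at h ⊢; omega
    | some ps =>
      simp only [depthF, hget, Option.map_eq_some_iff] at h ⊢
      obtain ⟨m, hm, hd⟩ := h
      exact ⟨m, fold_omax_congr (fun q _ d' h' => ih q d' h') hm, hd⟩

lemma depthF_bound (g : List (String × List String)) :
    ∀ n p d, depthF g n p = some d → d ≤ n := by
  intro n
  induction n with
  | zero =>
    intro p d h
    cases hget : (PySem.Dict.mk g).get? p with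
    | none => simp [depthF, hget] at h; omega
    | some ps => simp [depthF, hget] at h
  | succ n ih =>
    intro p d h
    cases hget : (PySem.Dict.mk g).get? p with
    | none => simp [depthF, hget] at h; omega
    | some ps =>
      simp only [depthF, hget, Option.map_eq_some_iff] at h
      obtain ⟨m, hm, hd⟩ := h
      have := fold_omax_bound (fun q _ d' h' => ih q d' h') hm
      omega

lemma depthF_key_pos (g : List (String × List String)) {n : Nat} {p : String} {ps : List String} {d : Nat}
    (hget : (PySem.Dict.mk g).get? p = some ps) (h : depthF g n p = some d) : 1 ≤ d := by
  cases n with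
  | zero => simp [depthF, hget] at h
  | succ n =>
    simp only [depthF, hget, Option.map_eq_some_iff] at h
    obtain ⟨m, _, hd⟩ := h
    omega

lemma depthF_child (g : List (String × List String)) {n : Nat} {p : String} {ps : List String} {d : Nat}
    (hget : (PySem.Dict.mk g).get? p = some ps) (h : depthF g (n+1) p = some d) :
    ∀ q ∈ ps, ∃ d', depthF g n q = some d' ∧ d' < d := by
  simp only [depthF, hget, Option.map_eq_some_iff] at h
  obtain ⟨m, hm, hd⟩ := h
  intro q hq
  obtain ⟨d', hd', hle⟩ := fold_omax_mem hm q hq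
  exact ⟨d', hd', by omega⟩

lemma fuel_nonkey (g : List (String × List String)) {p : String}
    (h : (PySem.Dict.mk g).get? p = none) : ∀ n, ancestorsFuel g n p = [] := by
  intro n
  cases n with
  | zero => rfl
  | succ n => simp [ancestorsFuel, h]

lemma depth_zero_nonkey (g : List (String × List String)) {p : String}
    (h : depthF g (g.length + 1) p = some 0) : (PySem.Dict.mk g).get? p = none := by
  cases hget : (PySem.Dict.mk g).get? p with
  | none => rfl
  | some ps => have := depthF_key_pos g hget h; omega

lemma fuel_stable (g : List (String × List String)) :
    ∀ n m p d, depthF g (g.length + 1) p = some d → d ≤ n → d ≤ m →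
      ancestorsFuel g n p = ancestorsFuel g m p := by
  intro n
  induction n with
  | zero =>
    intro m p d hd h0 _
    have : d = 0 := by omega
    subst this
    have hnk := depth_zero_nonkey g hd
    rw [fuel_nonkey g hnk, fuel_nonkey g hnk]
  | succ n' ih =>
    intro m p d hd hn hm
    cases hget : (PySem.Dict.mk g).get? p with
    | none => rw [fuel_nonkey g hget, fuel_nonkey g hget]
    | some ps =>
      have hd1 : 1 ≤ d := depthF_key_pos g hget hd
      cases m with
      | zero => omega
      | succ m' =>
        simp only [ancestorsFuel, hget]
        apply PySem.List.foldl_congr_mem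
        intro acc q hq
        obtain ⟨d', hd', hlt⟩ := depthF_child g hget hd q hq
        have hd'N : depthF g (g.length + 1) q = some d' :=
          depthF_mono g _ q d' hd'
        rw [ih m' q d' hd'N (by omega) (by omega)]

lemma anc_nonkey (g : List (String × List String)) {p : String}
    (h : (PySem.Dict.mk g).get? p = none) : ancestors g p = [] := fuel_nonkey g h _

lemma anc_key (g : List (String × List String)) {p : String} {ps : List String} {d : Nat}
    (hget : (PySem.Dict.mk g).get? p = some ps)
    (hd : depthF g (g.length + 1) p = some d) :
    ancestors g p = ps ++ ps.flatMap (fun q => ancestors g q) := by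
  have hdle : d ≤ g.length + 1 := depthF_bound g _ p d hd
  unfold ancestors
  simp only [ancestorsFuel, hget]
  rw [PySem.List.foldl_congr_mem ps _ (fun result parent => result ++ ancestors g parent) ps
    (by
      intro acc q hq
      have hN : g.length + 1 = g.length + 1 := rfl
      obtain ⟨d', hd', hlt⟩ := depthF_child g hget hd q hq
      have hd'N : depthF g (g.length + 1) q = some d' := depthF_mono g _ q d' hd'
      rw [fuel_stable g g.length (g.length + 1) q d' hd'N (by omega) (by omega)]
      rfl)]
  exact PySem.List.foldl_append_eq_flatMap ..

def InvM (g : List (String × List String)) (memo : PySem.Dict String (List String)) : Prop :=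
  ∀ k v, memo.get? k = some v → v = ancestors g k

lemma visit_ok (g : List (String × List String)) :
    ∀ n memo p d, InvM g memo → depthF g (g.length + 1) p = some d → d ≤ n →
      (visitB g n memo p).1 = ancestors g p ∧ InvM g (visitB g n memo p).2 := by
  intro n
  induction n with
  | zero =>
    intro memo p d hinv hd h0
    have : d = 0 := by omega
    subst this
    exact ⟨(anc_nonkey g (depth_zero_nonkey g hd)).symm, hinv⟩
  | succ n' ih =>
    intro memo p d hinv hd hn
    simp only [visitB]
    cases hmg : memo.get? p with
    | some v => exact ⟨hinv p v hmg, hinv⟩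
    | none =>
      dsimp only
      cases hget : (PySem.Dict.mk g).get? p with
      | none => exact ⟨(anc_nonkey g hget).symm, hinv⟩
      | some ps =>
        have hchild : ∀ q ∈ ps, ∃ d', depthF g (g.length + 1) q = some d' ∧ d' ≤ n' := by
          intro q hq
          obtain ⟨d', hd', hlt⟩ := depthF_child g hget hd q hq
          exact ⟨d', depthF_mono g _ q d' hd', by omega⟩
        have hfold : ∀ (l : List String), (∀ q ∈ l, ∃ d', depthF g (g.length + 1) q = some d' ∧ d' ≤ n') →
            ∀ acc memo', InvM g memo' →
            (l.foldl (fun (st : List String × PySem.Dict String (List String)) q =>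
              let r := visitB g n' st.2 q
              (st.1 ++ r.1, r.2)) (acc, memo')).1 = acc ++ l.flatMap (fun q => ancestors g q) ∧
            InvM g (l.foldl (fun (st : List String × PySem.Dict String (List String)) q =>
              let r := visitB g n' st.2 q
              (st.1 ++ r.1, r.2)) (acc, memo')).2 := by
          intro l
          induction l with
          | nil => intro _ acc memo' hinv'; exact ⟨by simp, hinv'⟩
          | cons q l' ihl =>
            intro hql acc memo' hinv'
            obtain ⟨dq, hdq, hdqn⟩ := hql q List.mem_cons_self
            obtain ⟨h1, h2⟩ := ih memo' q dq hinv' hdq hdqn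
            simp only [List.foldl_cons]
            have := ihl (fun r hr => hql r (List.mem_cons_of_mem _ hr)) (acc ++ (visitB g n' memo' q).1) (visitB g n' memo' q).2 h2
            refine ⟨?_, this.2⟩
            rw [this.1, h1, List.flatMap_cons, List.append_assoc]
        obtain ⟨h1, h2⟩ := hfold ps hchild ps memo hinv
        constructor
        · simp only [h1]
          exact (anc_key g hget hd).symm
        · intro k v hkv
          rw [PySem.Dict.get?_insert] at hkv
          by_cases hkp : k = p
          · rw [if_pos hkp] at hkv
            cases hkv
            rw [h1, hkp]
            exact (anc_key g hget hd).symm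
          · rw [if_neg hkp] at hkv
            exact h2 k v hkv

-- ===== VERDICT (by name: the statement is the Claim_ definition above) =====
theorem ancestors_spec : Claim_equal_ancestors := by
  intro g person _ hpre
  obtain ⟨d, hd⟩ := Option.isSome_iff_exists.mp hpre
  have hdle : d ≤ g.length + 1 := depthF_bound g _ person d hd
  have h := visit_ok g (g.length + 1) PySem.Dict.empty person d
    (by intro k v hkv; rw [PySem.Dict.get?_empty] at hkv; cases hkv) hd hdle
  unfold Spec_ancestors ancestors_alt
  exact h.1.symm
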